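-- pv_equiv track=rewrite | github.com/DingX2/Baekjoon | 프로그래머스/2/159993. 미로 탈출/미로 탈출.py | solution
-- ===== SOURCE A (Python) =====
-- from collections import deque
--
-- def solution(maps):
--     start, end, level, leverFlag = 0, 0, 0, False;
--     n, m = len(maps), len(maps[0])
--     visitedtoL = [ [False] * m for _ in range(n)]
--     visitedtoE = [ [False] * m for _ in range(n)]
--     direction = [(1,0), (0,1), (0,-1), (-1,0)]
--
--     for i, row in enumerate(maps):
--         for j, s in enumerate(row):
--             if s == 'S':
--                 start = [i, j]
--             elif s == 'E':
--                 end = [i, j]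
--             elif s == 'L':
--                 lever = [i, j]
--
--     def BFS(sx, sy):
--         queue = deque()
--         queue.append((sx, sy, 0, False))
--         visitedtoL[sx][sy] = True
--
--         while (len(queue) > 0):
--             cx, cy, level, leverFlag = queue.popleft()
--             if not leverFlag and maps[cx][cy] == 'L':
--                 queue.append((cx, cy, level, True))
--                 visitedtoE[cx][cy] = True
--                 continue
--             if leverFlag and maps[cx][cy] == 'E': return level;
--
--             for dx, dy in direction:
--                 nx, ny = cx + dx, cy + dy
--                 if(0<=nx<n and 0<=ny<m and not maps[nx][ny] == 'X'):
--                     if leverFlag and not visitedtoE[nx][ny]: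
--                         visitedtoE[nx][ny] = True
--                         queue.append((nx, ny, level+1, leverFlag))
--                     elif not leverFlag and not visitedtoL[nx][ny]:
--                         visitedtoL[nx][ny] = True
--                         queue.append((nx, ny, level+1, leverFlag))
--         return -1
--
--     return BFS(start[0], start[1])
-- ===== SOURCE B (Python) =====
-- from collections import deque
--
-- def solution(maps):
--     # Two independent staged BFS passes: S -> lever, then lever -> exit; sum the legs.
--     n, m = len(maps), len(maps[0])
--
--     def bfs(sx, sy, target):
--         visited = [[False] * m for _ in range(n)]
--         visited[sx][sy] = True
--         queue = deque([(sx, sy, 0)])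
--         while queue:
--             x, y, dist = queue.popleft()
--             if maps[x][y] == target:
--                 return x, y, dist
--             for dx, dy in ((1, 0), (0, 1), (0, -1), (-1, 0)):
--                 nx, ny = x + dx, y + dy
--                 if 0 <= nx < n and 0 <= ny < m and maps[nx][ny] != 'X' and not visited[nx][ny]:
--                     visited[nx][ny] = True
--                     queue.append((nx, ny, dist + 1))
--         return None
--
--     for i, row in enumerate(maps):
--         for j, c in enumerate(row):
--             if c == 'S':
--                 sx, sy = i, j
--
--     leg1 = bfs(sx, sy, 'L')
--     if leg1 is None:
--         return -1
--     lx, ly, d1 = leg1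
--     leg2 = bfs(lx, ly, 'E')
--     if leg2 is None:
--         return -1
--     return d1 + leg2[2]
-- ===== Notes on version B (the rewrite author's own statement) =====
-- stated objective: simpler
-- what changed: Replaces A's single merged BFS that threads a leverFlag through every queue tuple over two visited matrices (re-enqueueing the lever cell with the flag flipped) by two independent staged passes of one ordinary grid-BFS helper bfs(sx, sy, target) with one fresh visited matrix each: S to the lever, then the lever to the exit, returning -1 if either leg fails and the sum of the two legs otherwise.
-- outside the precondition, e.g. on solution(['SLE', 'XXX', '..']): A returns 2, B returns 2; on solution(['ESEX.', 'LES.X', 'L.XLL', 'EEE.E']): A returns 3, B returns 4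
import Mathlib
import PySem

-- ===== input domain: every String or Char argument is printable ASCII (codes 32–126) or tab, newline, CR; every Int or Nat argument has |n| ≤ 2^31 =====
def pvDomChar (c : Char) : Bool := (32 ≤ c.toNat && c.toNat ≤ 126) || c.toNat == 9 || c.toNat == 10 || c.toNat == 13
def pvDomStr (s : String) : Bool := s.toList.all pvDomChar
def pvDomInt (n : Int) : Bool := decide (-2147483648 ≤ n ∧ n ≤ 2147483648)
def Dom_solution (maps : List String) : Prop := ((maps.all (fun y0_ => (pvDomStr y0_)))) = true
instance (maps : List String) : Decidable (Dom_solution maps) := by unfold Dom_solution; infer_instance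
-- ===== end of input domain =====

-- B replaces A's single merged lever-flag BFS (a leverFlag threaded through every queue
-- tuple, two visited matrices, re-enqueueing at the lever) by two independent staged
-- passes of one ordinary grid BFS helper — S to lever, then lever to exit — summing the
-- two legs (objective: simpler decomposition, same asymptotic cost).

-- ===== PORT A =====

-- shared lookup helper: maps[x][y] (none = IndexError in Python)
def cellAt (maps : List String) (x y : Int) : Option Char :=
  (PySem.List.pyGet? maps x).bind (fun r => PySem.Str.pyGet? r y)

def dirs : List (Int × Int) := [(1, 0), (0, 1), (0, -1), (-1, 0)]

-- '0<=nx<n and 0<=ny<m and not maps[nx][ny] == "X"'.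
-- `cellAt = none` (a ragged row) is where Python raises IndexError: outside Pre_; treated as blocked.
def moveOk (maps : List String) (n m nx ny : Int) : Bool :=
  decide (0 ≤ nx ∧ nx < n ∧ 0 ≤ ny ∧ ny < m) && ((cellAt maps nx ny).any (fun c => c != 'X'))

-- a boolean visited matrix, ported as its characteristic function (same point reads/writes)
def mark (v : Int × Int → Bool) (x y : Int) : Int × Int → Bool :=
  fun p => if p = (x, y) then true else v p

-- the S/E/L locating scan; `start`/`end`/`lever` begin as the int 0 (no position yet): Option
def locStepA (i : Int)
    (st : Option (Int × Int) × Option (Int × Int) × Option (Int × Int))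
    (q : Int × Char) :
    Option (Int × Int) × Option (Int × Int) × Option (Int × Int) :=
  if q.2 = 'S' then (some (i, q.1), st.2.1, st.2.2)
  else if q.2 = 'E' then (st.1, some (i, q.1), st.2.2)
  else if q.2 = 'L' then (st.1, st.2.1, some (i, q.1))
  else st

def locateA (maps : List String) :
    Option (Int × Int) × Option (Int × Int) × Option (Int × Int) :=
  (PySem.List.enumerate maps).foldl (fun st p =>
    (PySem.List.enumerate p.2.toList).foldl (locStepA p.1) st) (none, none, none)

-- one direction (dx,dy) of A's inner `for dx, dy in direction` loop
def stepA (maps : List String) (n m : Int) (flag : Bool) (lvl cx cy : Int)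
    (st : (Int × Int → Bool) × (Int × Int → Bool) × List (Int × Int × Int × Bool))
    (d : Int × Int) :
    (Int × Int → Bool) × (Int × Int → Bool) × List (Int × Int × Int × Bool) :=
  let nx := cx + d.1
  let ny := cy + d.2
  if moveOk maps n m nx ny then
    if flag then
      (if st.2.1 (nx, ny) then st
       else (st.1, mark st.2.1 nx ny, st.2.2 ++ [(nx, ny, lvl + 1, true)]))
    else
      (if st.1 (nx, ny) then st
       else (mark st.1 nx ny, st.2.1, st.2.2 ++ [(nx, ny, lvl + 1, false)]))
  else st

-- termination bookkeeping (not part of the algorithm): grid cells, unmarked counters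
def allCells (maps : List String) : List (Int × Int) :=
  (PySem.List.enumerate maps).flatMap (fun p =>
    (PySem.List.enumerate p.2.toList).map (fun q => (p.1, q.1)))

def unmarked (maps : List String) (v : Int × Int → Bool) : Nat :=
  (allCells maps).countP (fun p => !v p)

def isLevEntry (maps : List String) (e : Int × Int × Int × Bool) : Bool :=
  !e.2.2.2 && (cellAt maps e.1 e.2.1 == some 'L')

def muA (maps : List String) (q : List (Int × Int × Int × Bool))
    (vL vE : Int × Int → Bool) : Nat :=
  5 * (unmarked maps vL + unmarked maps vE) + q.length + q.countP (isLevEntry maps)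

theorem unmarked_mark_le (maps : List String) (v : Int × Int → Bool) (x y : Int) :
    unmarked maps (mark v x y) ≤ unmarked maps v := by
  apply List.countP_mono_left
  intro p _ hp
  simp only [mark] at hp ⊢
  split at hp
  · simp at hp
  · exact hp

theorem countP_notMark_le (v : Int × Int → Bool) (x y : Int) (l : List (Int × Int)) :
    l.countP (fun p => !mark v x y p) ≤ l.countP (fun p => !v p) := by
  apply List.countP_mono_left
  intro p _ hp
  simp only [mark] at hp ⊢
  split at hp
  · simp at hp
  · exact hp

theorem mem_allCells_of_cellAt (maps : List String) (x y : Int) (c : Char)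
    (hx : 0 ≤ x) (hy : 0 ≤ y) (hc : cellAt maps x y = some c) :
    (x, y) ∈ allCells maps := by
  simp only [cellAt, Option.bind_eq_some_iff] at hc
  obtain ⟨r, hr, hrc⟩ := hc
  rw [PySem.List.pyGet?_of_nonneg _ hx] at hr
  have hxlen : x.toNat < maps.length := by
    by_contra h
    simp [List.getElem?_eq_none (by omega : maps.length ≤ x.toNat)] at hr
  have hrx : maps[x.toNat] = r := by simpa [List.getElem?_eq_getElem hxlen] using hr
  have hrc' : PySem.List.pyGet? r.toList y = some c := hrc
  rw [PySem.List.pyGet?_of_nonneg _ hy] at hrc'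
  have hylen : y.toNat < r.toList.length := by
    by_contra h
    simp [List.getElem?_eq_none (by omega : r.toList.length ≤ y.toNat)] at hrc'
  simp only [allCells, List.mem_flatMap]
  refine ⟨((x.toNat : Int), r), ?_, ?_⟩
  · rw [PySem.List.mem_enumerate_iff]
    exact ⟨x.toNat, hxlen, by simp [hrx]⟩
  · simp only [List.mem_map]
    refine ⟨((y.toNat : Int), r.toList[y.toNat]), ?_, ?_⟩
    · rw [PySem.List.mem_enumerate_iff]
      exact ⟨y.toNat, hylen, by simp⟩
    · simp [hx, hy]

theorem unmarked_mark_lt (maps : List String) (v : Int × Int → Bool) (x y : Int)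
    (hmem : (x, y) ∈ allCells maps) (hv : v (x, y) = false) :
    unmarked maps (mark v x y) < unmarked maps v := by
  obtain ⟨s, t, hst⟩ := List.append_of_mem hmem
  simp only [unmarked, hst, List.countP_append, List.countP_cons]
  have h1 := countP_notMark_le v x y s
  have h2 := countP_notMark_le v x y t
  have hmk : (mark v x y) (x, y) = true := by simp [mark]
  simp only [hv, hmk]
  simp
  omega

theorem stepA_mu_le (maps : List String) (n m : Int) (flag : Bool) (lvl cx cy : Int)
    (st : (Int × Int → Bool) × (Int × Int → Bool) × List (Int × Int × Int × Bool))
    (d : Int × Int) :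
    muA maps (stepA maps n m flag lvl cx cy st d).2.2 (stepA maps n m flag lvl cx cy st d).1
      (stepA maps n m flag lvl cx cy st d).2.1 ≤ muA maps st.2.2 st.1 st.2.1 := by
  obtain ⟨vL, vE, q⟩ := st
  simp only [stepA]
  split
  · next hok =>
    have hcell : ∃ c, cellAt maps (cx + d.1) (cy + d.2) = some c ∧ c ≠ 'X' := by
      simp only [moveOk, Bool.and_eq_true, Option.any_eq_true] at hok
      obtain ⟨-, c, hc, hcx⟩ := hok
      exact ⟨c, hc, by simpa using hcx⟩
    have hb : 0 ≤ cx + d.1 ∧ 0 ≤ cy + d.2 := by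
      simp only [moveOk, Bool.and_eq_true, decide_eq_true_eq] at hok
      exact ⟨hok.1.1, hok.1.2.2.1⟩
    obtain ⟨c, hc, -⟩ := hcell
    have hmem : (cx + d.1, cy + d.2) ∈ allCells maps :=
      mem_allCells_of_cellAt maps _ _ c hb.1 hb.2 hc
    split
    · -- leverFlag: visitedtoE side
      split
      · exact le_refl _
      · next hnv =>
        have hlt := unmarked_mark_lt maps vE (cx + d.1) (cy + d.2) hmem
          (by simpa using hnv)
        have hcnt : List.countP (isLevEntry maps)
            (q ++ [(cx + d.1, cy + d.2, lvl + 1, true)]) ≤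
            List.countP (isLevEntry maps) q + 1 := by
          rw [List.countP_append]
          have := List.countP_le_length (p := isLevEntry maps)
            (l := [(cx + d.1, cy + d.2, lvl + 1, true)])
          simp at this ⊢
          omega
        simp only [muA, List.length_append, List.length_cons, List.length_nil]
        omega
    · -- not leverFlag: visitedtoL side
      split
      · exact le_refl _
      · next hnv =>
        have hlt := unmarked_mark_lt maps vL (cx + d.1) (cy + d.2) hmem
          (by simpa using hnv)
        have hcnt : List.countP (isLevEntry maps)
            (q ++ [(cx + d.1, cy + d.2, lvl + 1, false)]) ≤
            List.countP (isLevEntry maps) q + 1 := by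
          rw [List.countP_append]
          have := List.countP_le_length (p := isLevEntry maps)
            (l := [(cx + d.1, cy + d.2, lvl + 1, false)])
          simp at this ⊢
          omega
        simp only [muA, List.length_append, List.length_cons, List.length_nil]
        omega
  · exact le_refl _

theorem foldA_mu_le (maps : List String) (n m : Int) (flag : Bool) (lvl cx cy : Int)
    (ds : List (Int × Int))
    (st : (Int × Int → Bool) × (Int × Int → Bool) × List (Int × Int × Int × Bool)) :
    muA maps (ds.foldl (stepA maps n m flag lvl cx cy) st).2.2
      (ds.foldl (stepA maps n m flag lvl cx cy) st).1
      (ds.foldl (stepA maps n m flag lvl cx cy) st).2.1 ≤ muA maps st.2.2 st.1 st.2.1 := by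
  induction ds generalizing st with
  | nil => simp
  | cons d ds ih =>
    simp only [List.foldl_cons]
    exact le_trans (ih _) (stepA_mu_le maps n m flag lvl cx cy st d)

theorem muA_lever_lt (maps : List String) (cx cy lvl : Int)
    (rest : List (Int × Int × Int × Bool)) (vL vE : Int × Int → Bool)
    (hlevc : cellAt maps cx cy = some 'L') :
    muA maps (rest ++ [(cx, cy, lvl, true)]) vL (mark vE cx cy) <
      muA maps ((cx, cy, lvl, false) :: rest) vL vE := by
  have hle := unmarked_mark_le maps vE cx cy
  have hpop : isLevEntry maps (cx, cy, lvl, false) = true := by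
    simp [isLevEntry, hlevc]
  have hnew : isLevEntry maps (cx, cy, lvl, true) = false := by simp [isLevEntry]
  simp only [muA, List.countP_append, List.length_append, List.countP_cons,
    List.countP_nil, List.length_cons, List.length_nil, hpop, hnew,
    Bool.false_eq_true, reduceIte]
  omega

theorem muA_fold_lt (maps : List String) (n m : Int) (flag : Bool) (lvl cx cy : Int)
    (rest : List (Int × Int × Int × Bool)) (vL vE : Int × Int → Bool) :
    muA maps (dirs.foldl (stepA maps n m flag lvl cx cy) (vL, vE, rest)).2.2
      (dirs.foldl (stepA maps n m flag lvl cx cy) (vL, vE, rest)).1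
      (dirs.foldl (stepA maps n m flag lvl cx cy) (vL, vE, rest)).2.1 <
      muA maps ((cx, cy, lvl, flag) :: rest) vL vE := by
  have h := foldA_mu_le maps n m flag lvl cx cy dirs (vL, vE, rest)
  simp only [muA, List.length_cons, List.countP_cons] at h ⊢
  omega

-- the merged lever-flag BFS of A (deque of (x, y, level, leverFlag))
def bfsA (maps : List String) (n m : Int) :
    List (Int × Int × Int × Bool) → (Int × Int → Bool) → (Int × Int → Bool) → Int
  | [], _, _ => -1
  | (cx, cy, lvl, flag) :: rest, vL, vE =>
    if flag = false ∧ cellAt maps cx cy = some 'L' then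
      bfsA maps n m (rest ++ [(cx, cy, lvl, true)]) vL (mark vE cx cy)
    else if flag = true ∧ cellAt maps cx cy = some 'E' then lvl
    else
      let st := dirs.foldl (stepA maps n m flag lvl cx cy) (vL, vE, rest)
      bfsA maps n m st.2.2 st.1 st.2.1
termination_by q vL vE => muA maps q vL vE
decreasing_by
  · -- lever re-enqueue: queue length unchanged, one flagless-lever entry fewer
    rename_i hlev
    obtain ⟨hf, hc⟩ := hlev
    subst hf
    exact muA_lever_lt maps cx cy lvl rest vL vE hc
  · -- expansion: the popped entry is gone, the fold does not increase the measure
    exact muA_fold_lt maps n m flag lvl cx cy rest vL vE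

def solution (maps : List String) : Int :=
  let n : Int := PySem.List.len maps
  let m : Int := PySem.Str.len ((PySem.List.pyGet? maps 0).getD "")  -- maps[0]; Python raises IndexError on []: outside Pre_
  match (locateA maps).1 with
  | none => 0   -- no 'S': Python raises TypeError (`start` is still the int 0): outside Pre_
  | some (sx, sy) =>
      bfsA maps n m [(sx, sy, 0, false)] (mark (fun _ => false) sx sy) (fun _ => false)

-- ===== PORT B =====

-- B's locating scan (sx, sy overwritten by the last 'S')
def locStepB (i : Int) (st : Option (Int × Int)) (q : Int × Char) : Option (Int × Int) :=
  if q.2 = 'S' then some (i, q.1) else st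

def locateB (maps : List String) : Option (Int × Int) :=
  (PySem.List.enumerate maps).foldl (fun st p =>
    (PySem.List.enumerate p.2.toList).foldl (locStepB p.1) st) none

-- one direction of B's inner loop: '… and maps[nx][ny] != "X" and not visited[nx][ny]'
def stepG (maps : List String) (n m d x y : Int)
    (acc : (Int × Int → Bool) × List (Int × Int × Int)) (dir : Int × Int) :
    (Int × Int → Bool) × List (Int × Int × Int) :=
  let nx := x + dir.1
  let ny := y + dir.2
  if moveOk maps n m nx ny && !(acc.1 (nx, ny)) then
    (mark acc.1 nx ny, acc.2 ++ [(nx, ny, d + 1)])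
  else acc

def muG (maps : List String) (q : List (Int × Int × Int)) (v : Int × Int → Bool) : Nat :=
  2 * unmarked maps v + q.length

theorem stepG_mu_le (maps : List String) (n m d x y : Int)
    (acc : (Int × Int → Bool) × List (Int × Int × Int)) (dir : Int × Int) :
    muG maps (stepG maps n m d x y acc dir).2 (stepG maps n m d x y acc dir).1 ≤
      muG maps acc.2 acc.1 := by
  obtain ⟨v, q⟩ := acc
  simp only [stepG]
  split
  · next hok =>
    simp only [Bool.and_eq_true, Bool.not_eq_true'] at hok
    obtain ⟨hmv, hnv⟩ := hok
    have hcell : ∃ c, cellAt maps (x + dir.1) (y + dir.2) = some c := by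
      simp only [moveOk, Bool.and_eq_true, Option.any_eq_true] at hmv
      exact ⟨hmv.2.choose, hmv.2.choose_spec.1⟩
    have hb : 0 ≤ x + dir.1 ∧ 0 ≤ y + dir.2 := by
      simp only [moveOk, Bool.and_eq_true, decide_eq_true_eq] at hmv
      exact ⟨hmv.1.1, hmv.1.2.2.1⟩
    obtain ⟨c, hc⟩ := hcell
    have hmem : (x + dir.1, y + dir.2) ∈ allCells maps :=
      mem_allCells_of_cellAt maps _ _ c hb.1 hb.2 hc
    have hlt := unmarked_mark_lt maps v (x + dir.1) (y + dir.2) hmem hnv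
    simp only [muG, List.length_append, List.length_cons, List.length_nil]
    omega
  · exact le_refl _

theorem foldG_mu_le (maps : List String) (n m d x y : Int) (ds : List (Int × Int))
    (acc : (Int × Int → Bool) × List (Int × Int × Int)) :
    muG maps (ds.foldl (stepG maps n m d x y) acc).2
      (ds.foldl (stepG maps n m d x y) acc).1 ≤ muG maps acc.2 acc.1 := by
  induction ds generalizing acc with
  | nil => simp
  | cons dir ds ih =>
    simp only [List.foldl_cons]
    exact le_trans (ih _) (stepG_mu_le maps n m d x y acc dir)

theorem muG_fold_lt (maps : List String) (n m d x y : Int)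
    (rest : List (Int × Int × Int)) (v : Int × Int → Bool) :
    muG maps (dirs.foldl (stepG maps n m d x y) (v, rest)).2
      (dirs.foldl (stepG maps n m d x y) (v, rest)).1 <
      muG maps ((x, y, d) :: rest) v := by
  have h := foldG_mu_le maps n m d x y dirs (v, rest)
  simp only [muG, List.length_cons] at h ⊢
  omega

-- B's plain grid BFS to the first cell whose char equals `target`
def bfsGen (maps : List String) (n m : Int) (target : Char) :
    List (Int × Int × Int) → (Int × Int → Bool) → Option (Int × Int × Int)
  | [], _ => none
  | (x, y, d) :: rest, v =>
    if cellAt maps x y = some target then some (x, y, d)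
    else
      let st := dirs.foldl (stepG maps n m d x y) (v, rest)
      bfsGen maps n m target st.2 st.1
termination_by q v => muG maps q v
decreasing_by
  exact muG_fold_lt maps n m d x y rest v

def solution_alt (maps : List String) : Int :=
  let n : Int := PySem.List.len maps
  let m : Int := PySem.Str.len ((PySem.List.pyGet? maps 0).getD "")
  match locateB maps with
  | none => 0   -- no 'S': Python raises NameError on sx: outside Pre_
  | some (sx, sy) =>
      match bfsGen maps n m 'L' [(sx, sy, 0)] (mark (fun _ => false) sx sy) with
      | none => -1
      | some (lx, ly, d1) =>
          match bfsGen maps n m 'E' [(lx, ly, 0)] (mark (fun _ => false) lx ly) with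
          | none => -1
          | some (_, _, d2) => d1 + d2

-- ===== PRECONDITION & SPEC =====
-- Pre_ excludes the inputs where A raises — the empty list, no 'S' anywhere (TypeError:
-- `start` is still the int 0), an 'S' at a column ≥ len(maps[0]) (IndexError marking
-- visitedtoL), a row shorter than maps[0] (IndexError when the BFS probes it; this also
-- drops some ragged grids whose short rows A's BFS happens never to probe) — and grids
-- with more than one 'L', a maze shape the puzzle rules out, on which A's multi-source
-- second phase and B's single lever choice are both accidental rather than specified.
def Pre_solution (maps : List String) : Prop :=
  maps ≠ [] ∧
  (∀ r ∈ maps, PySem.Str.len ((PySem.List.pyGet? maps 0).getD "") ≤ PySem.Str.len r) ∧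
  1 ≤ (allCells maps).countP (fun p => cellAt maps p.1 p.2 == some 'S') ∧
  (∀ p ∈ allCells maps, cellAt maps p.1 p.2 = some 'S' →
    p.2 < PySem.Str.len ((PySem.List.pyGet? maps 0).getD "")) ∧
  (allCells maps).countP (fun p => cellAt maps p.1 p.2 == some 'L') ≤ 1

instance (maps : List String) : Decidable (Pre_solution maps) := by
  unfold Pre_solution; infer_instance

def pvWitness_solution : List String := ["S.L", ".X.", "E.."]

def Spec_solution (maps : List String) (out : Int) : Prop := out = solution_alt maps
instance (maps : List String) (out : Int) : Decidable (Spec_solution maps out) := by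
  unfold Spec_solution; infer_instance

-- ===== CLAIM (what is proved, stated in full; the proofs are below) =====
def Claim_equal_solution : Prop :=
  ∀ (maps : List String), Dom_solution maps → Pre_solution maps →
    Spec_solution maps (solution maps)

-- ===== LEMMAS AND PROOFS =====

-- an A-queue entry viewed without its flag / the flagged entries only
def projF (e : Int × Int × Int × Bool) : Int × Int × Int := (e.1, e.2.1, e.2.2.1)

def projT (q : List (Int × Int × Int × Bool)) : List (Int × Int × Int) :=
  q.filterMap (fun e => if e.2.2.2 then some (e.1, e.2.1, e.2.2.1) else none)

def liftRes (o : Option (Int × Int × Int)) : Int :=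
  match o with
  | none => -1
  | some e => e.2.2

def shiftE (c : Int) (e : Int × Int × Int) : Int × Int × Int := (e.1, e.2.1, e.2.2 + c)

def inbP (n m x y : Int) : Prop := 0 ≤ x ∧ x < n ∧ 0 ≤ y ∧ y < m

theorem moveOk_facts (maps : List String) (n m nx ny : Int)
    (h : moveOk maps n m nx ny = true) :
    inbP n m nx ny ∧ ∃ c, cellAt maps nx ny = some c := by
  simp only [moveOk, Bool.and_eq_true, decide_eq_true_eq, Option.any_eq_true] at h
  exact ⟨⟨h.1.1, h.1.2.1, h.1.2.2.1, h.1.2.2.2⟩, h.2.choose, h.2.choose_spec.1⟩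

theorem mark_mono (v : Int × Int → Bool) (x y : Int) (p : Int × Int)
    (h : v p = true) : mark v x y p = true := by
  simp only [mark]
  split
  · rfl
  · exact h

-- dist-shift commutes with one expansion step and with the whole generic BFS
theorem stepG_shift (maps : List String) (n m d c x y : Int)
    (acc : (Int × Int → Bool) × List (Int × Int × Int)) (dir : Int × Int) :
    stepG maps n m (d + c) x y (acc.1, acc.2.map (shiftE c)) dir =
      ((stepG maps n m d x y acc dir).1,
       (stepG maps n m d x y acc dir).2.map (shiftE c)) := by
  obtain ⟨v, q⟩ := acc
  simp only [stepG]
  split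
  · next hcond =>
    refine Prod.ext rfl ?_
    simp only [List.map_append, List.map_cons, List.map_nil, shiftE,
      List.append_cancel_left_eq, List.cons.injEq, Prod.mk.injEq, and_true, true_and]
    omega
  · next hcond =>
    rfl

theorem foldG_shift (maps : List String) (n m d c x y : Int) (ds : List (Int × Int))
    (acc : (Int × Int → Bool) × List (Int × Int × Int)) :
    ds.foldl (stepG maps n m (d + c) x y) (acc.1, acc.2.map (shiftE c)) =
      ((ds.foldl (stepG maps n m d x y) acc).1,
       (ds.foldl (stepG maps n m d x y) acc).2.map (shiftE c)) := by
  induction ds generalizing acc with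
  | nil => rfl
  | cons dir ds ih =>
    simp only [List.foldl_cons]
    rw [stepG_shift maps n m d c x y acc dir]
    exact ih _

theorem bfsGen_shift (maps : List String) (n m : Int) (target : Char) (c : Int) :
    ∀ (N : Nat) (q : List (Int × Int × Int)) (v : Int × Int → Bool),
      muG maps q v = N →
      bfsGen maps n m target (q.map (shiftE c)) v =
        (bfsGen maps n m target q v).map (shiftE c) := by
  intro N
  induction N using Nat.strong_induction_on with
  | _ N IH =>
  intro q v hN
  cases q with
  | nil => simp [bfsGen]
  | cons e rest =>
    obtain ⟨x, y, d⟩ := e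
    simp only [List.map_cons, shiftE, bfsGen]
    by_cases hc : cellAt maps x y = some target
    · rw [if_pos hc, if_pos hc]
      simp [shiftE]
    · rw [if_neg hc, if_neg hc]
      have hfold := foldG_shift maps n m d c x y dirs (v, rest)
      simp only at hfold
      rw [hfold]
      exact IH (muG maps (dirs.foldl (stepG maps n m d x y) (v, rest)).2
          (dirs.foldl (stepG maps n m d x y) (v, rest)).1)
        (hN ▸ muG_fold_lt maps n m d x y rest v) _ _ rfl

-- mid-fold invariant for phase 1: B's first BFS mirrors A's flagless expansion
structure F1 (maps : List String) (n m : Int) (vE0 : Int × Int → Bool)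
    (st : (Int × Int → Bool) × (Int × Int → Bool) × List (Int × Int × Int × Bool))
    (acc : (Int × Int → Bool) × List (Int × Int × Int)) : Prop where
  hv : acc.1 = st.1
  hq : acc.2 = st.2.2.map projF
  hvE : st.2.1 = vE0
  hAllF : ∀ e ∈ st.2.2, e.2.2.2 = false
  hMarked : ∀ e ∈ st.2.2, st.1 (e.1, e.2.1) = true
  hInb : ∀ e ∈ st.2.2, inbP n m e.1 e.2.1
  hDist : st.2.2.Pairwise (fun a b => ((a.1, a.2.1) : Int × Int) ≠ (b.1, b.2.1))

theorem stepF1 (maps : List String) (n m lvl cx cy : Int) (vE0 : Int × Int → Bool)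
    (st : (Int × Int → Bool) × (Int × Int → Bool) × List (Int × Int × Int × Bool))
    (acc : (Int × Int → Bool) × List (Int × Int × Int)) (d : Int × Int)
    (h : F1 maps n m vE0 st acc) :
    F1 maps n m vE0 (stepA maps n m false lvl cx cy st d)
      (stepG maps n m lvl cx cy acc d) := by
  obtain ⟨vL, vE, qa⟩ := st
  obtain ⟨v, qg⟩ := acc
  obtain ⟨hv, hq, hvE, hAllF, hMarked, hInb, hDist⟩ := h
  simp only at hv hq hvE hAllF hMarked hInb hDist
  subst hv
  by_cases hok : moveOk maps n m (cx + d.1) (cy + d.2) = true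
  · obtain ⟨hinbN, cc, hc⟩ := moveOk_facts maps n m _ _ hok
    by_cases hvis : v (cx + d.1, cy + d.2) = true
    · have hA : stepA maps n m false lvl cx cy (v, vE, qa) d = (v, vE, qa) := by
        simp [stepA, hok, hvis]
      have hG : stepG maps n m lvl cx cy (v, qg) d = (v, qg) := by
        simp [stepG, hok, hvis]
      rw [hA, hG]
      exact ⟨rfl, hq, hvE, hAllF, hMarked, hInb, hDist⟩
    · have hvis' : v (cx + d.1, cy + d.2) = false := by
        cases hx : v (cx + d.1, cy + d.2)
        · rfl
        · exact absurd hx hvis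
      have hA : stepA maps n m false lvl cx cy (v, vE, qa) d =
          (mark v (cx + d.1) (cy + d.2), vE,
           qa ++ [(cx + d.1, cy + d.2, lvl + 1, false)]) := by
        simp [stepA, hok, hvis']
      have hG : stepG maps n m lvl cx cy (v, qg) d =
          (mark v (cx + d.1) (cy + d.2), qg ++ [(cx + d.1, cy + d.2, lvl + 1)]) := by
        simp [stepG, hok, hvis']
      rw [hA, hG]
      refine ⟨rfl, ?_, hvE, ?_, ?_, ?_, ?_⟩
      · simp [hq, projF]
      · intro e he
        rcases List.mem_append.1 he with h' | h'
        · exact hAllF e h'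
        · simp only [List.mem_singleton] at h'
          subst h'
          rfl
      · intro e he
        rcases List.mem_append.1 he with h' | h'
        · exact mark_mono v _ _ _ (hMarked e h')
        · simp only [List.mem_singleton] at h'
          subst h'
          simp [mark]
      · intro e he
        rcases List.mem_append.1 he with h' | h'
        · exact hInb e h'
        · simp only [List.mem_singleton] at h'
          subst h'
          exact hinbN
      · rw [List.pairwise_append]
        refine ⟨hDist, List.pairwise_singleton _ _, ?_⟩
        intro a ha b hb
        simp only [List.mem_singleton] at hb
        subst hb
        intro heq
        have := hMarked a ha
        rw [heq] at this
        simp only at this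
        rw [this] at hvis'
        cases hvis'
  · have hok' : moveOk maps n m (cx + d.1) (cy + d.2) = false := by
      cases hx : moveOk maps n m (cx + d.1) (cy + d.2)
      · rfl
      · exact absurd hx hok
    have hA : stepA maps n m false lvl cx cy (v, vE, qa) d = (v, vE, qa) := by
      simp [stepA, hok']
    have hG : stepG maps n m lvl cx cy (v, qg) d = (v, qg) := by
      simp [stepG, hok']
    rw [hA, hG]
    exact ⟨rfl, hq, hvE, hAllF, hMarked, hInb, hDist⟩

theorem foldF1 (maps : List String) (n m lvl cx cy : Int) (vE0 : Int × Int → Bool)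
    (ds : List (Int × Int))
    (st : (Int × Int → Bool) × (Int × Int → Bool) × List (Int × Int × Int × Bool))
    (acc : (Int × Int → Bool) × List (Int × Int × Int))
    (h : F1 maps n m vE0 st acc) :
    F1 maps n m vE0 (ds.foldl (stepA maps n m false lvl cx cy) st)
      (ds.foldl (stepG maps n m lvl cx cy) acc) := by
  induction ds generalizing st acc with
  | nil => exact h
  | cons d ds ih =>
    simp only [List.foldl_cons]
    exact ih _ _ (stepF1 maps n m lvl cx cy vE0 st acc d h)

-- mid-fold invariant for phase 2: B's second BFS mirrors A's flagged expansion
structure F2 (maps : List String) (n m : Int) (vL0 : Int × Int → Bool)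
    (st : (Int × Int → Bool) × (Int × Int → Bool) × List (Int × Int × Int × Bool))
    (acc : (Int × Int → Bool) × List (Int × Int × Int)) : Prop where
  hvL : st.1 = vL0
  hv : acc.1 = st.2.1
  hq : acc.2 = projT st.2.2
  hNoLevF : ∀ e ∈ st.2.2, e.2.2.2 = false → cellAt maps e.1 e.2.1 ≠ some 'L'

theorem stepF2 (maps : List String) (n m lvl cx cy : Int) (vL0 : Int × Int → Bool)
    (st : (Int × Int → Bool) × (Int × Int → Bool) × List (Int × Int × Int × Bool))
    (acc : (Int × Int → Bool) × List (Int × Int × Int)) (d : Int × Int)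
    (h : F2 maps n m vL0 st acc) :
    F2 maps n m vL0 (stepA maps n m true lvl cx cy st d)
      (stepG maps n m lvl cx cy acc d) := by
  obtain ⟨vL, vE, qa⟩ := st
  obtain ⟨v, qg⟩ := acc
  obtain ⟨hvL, hv, hq, hNoLevF⟩ := h
  simp only at hvL hv hq hNoLevF
  subst hv
  by_cases hok : moveOk maps n m (cx + d.1) (cy + d.2) = true
  · by_cases hvis : v (cx + d.1, cy + d.2) = true
    · have hA : stepA maps n m true lvl cx cy (vL, v, qa) d = (vL, v, qa) := by
        simp [stepA, hok, hvis]
      have hG : stepG maps n m lvl cx cy (v, qg) d = (v, qg) := by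
        simp [stepG, hok, hvis]
      rw [hA, hG]
      exact ⟨hvL, rfl, hq, hNoLevF⟩
    · have hvis' : v (cx + d.1, cy + d.2) = false := by
        cases hx : v (cx + d.1, cy + d.2)
        · rfl
        · exact absurd hx hvis
      have hA : stepA maps n m true lvl cx cy (vL, v, qa) d =
          (vL, mark v (cx + d.1) (cy + d.2),
           qa ++ [(cx + d.1, cy + d.2, lvl + 1, true)]) := by
        simp [stepA, hok, hvis']
      have hG : stepG maps n m lvl cx cy (v, qg) d =
          (mark v (cx + d.1) (cy + d.2), qg ++ [(cx + d.1, cy + d.2, lvl + 1)]) := by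
        simp [stepG, hok, hvis']
      rw [hA, hG]
      refine ⟨hvL, rfl, ?_, ?_⟩
      · simp [hq, projT, List.filterMap_append]
      · intro e he hef
        rcases List.mem_append.1 he with h' | h'
        · exact hNoLevF e h' hef
        · simp only [List.mem_singleton] at h'
          subst h'
          cases hef
  · have hok' : moveOk maps n m (cx + d.1) (cy + d.2) = false := by
      cases hx : moveOk maps n m (cx + d.1) (cy + d.2)
      · rfl
      · exact absurd hx hok
    have hA : stepA maps n m true lvl cx cy (vL, v, qa) d = (vL, v, qa) := by
      simp [stepA, hok']
    have hG : stepG maps n m lvl cx cy (v, qg) d = (v, qg) := by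
      simp [stepG, hok']
    rw [hA, hG]
    exact ⟨hvL, rfl, hq, hNoLevF⟩

theorem foldF2 (maps : List String) (n m lvl cx cy : Int) (vL0 : Int × Int → Bool)
    (ds : List (Int × Int))
    (st : (Int × Int → Bool) × (Int × Int → Bool) × List (Int × Int × Int × Bool))
    (acc : (Int × Int → Bool) × List (Int × Int × Int))
    (h : F2 maps n m vL0 st acc) :
    F2 maps n m vL0 (ds.foldl (stepA maps n m true lvl cx cy) st)
      (ds.foldl (stepG maps n m lvl cx cy) acc) := by
  induction ds generalizing st acc with
  | nil => exact h
  | cons d ds ih =>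
    simp only [List.foldl_cons]
    exact ih _ _ (stepF2 maps n m lvl cx cy vL0 st acc d h)

-- invariant for A's leftover flagless expansion during phase 2 (erased on B's side)
structure F3 (maps : List String) (n m : Int) (vE0 : Int × Int → Bool)
    (P : List (Int × Int × Int))
    (st : (Int × Int → Bool) × (Int × Int → Bool) × List (Int × Int × Int × Bool)) :
    Prop where
  hvE : st.2.1 = vE0
  hq : projT st.2.2 = P
  hLevM : ∀ x y, inbP n m x y → cellAt maps x y = some 'L' → st.1 (x, y) = true
  hNoLevF : ∀ e ∈ st.2.2, e.2.2.2 = false → cellAt maps e.1 e.2.1 ≠ some 'L'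

theorem stepF3 (maps : List String) (n m lvl cx cy : Int) (vE0 : Int × Int → Bool)
    (P : List (Int × Int × Int))
    (st : (Int × Int → Bool) × (Int × Int → Bool) × List (Int × Int × Int × Bool))
    (d : Int × Int) (h : F3 maps n m vE0 P st) :
    F3 maps n m vE0 P (stepA maps n m false lvl cx cy st d) := by
  obtain ⟨vL, vE, qa⟩ := st
  obtain ⟨hvE, hq, hLevM, hNoLevF⟩ := h
  simp only at hvE hq hLevM hNoLevF
  by_cases hok : moveOk maps n m (cx + d.1) (cy + d.2) = true
  · obtain ⟨hinbN, cc, hc⟩ := moveOk_facts maps n m _ _ hok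
    by_cases hvis : vL (cx + d.1, cy + d.2) = true
    · have hA : stepA maps n m false lvl cx cy (vL, vE, qa) d = (vL, vE, qa) := by
        simp [stepA, hok, hvis]
      rw [hA]
      exact ⟨hvE, hq, hLevM, hNoLevF⟩
    · have hvis' : vL (cx + d.1, cy + d.2) = false := by
        cases hx : vL (cx + d.1, cy + d.2)
        · rfl
        · exact absurd hx hvis
      have hA : stepA maps n m false lvl cx cy (vL, vE, qa) d =
          (mark vL (cx + d.1) (cy + d.2), vE,
           qa ++ [(cx + d.1, cy + d.2, lvl + 1, false)]) := by
        simp [stepA, hok, hvis']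
      rw [hA]
      refine ⟨hvE, ?_, ?_, ?_⟩
      · simp only [projT, List.filterMap_append] at hq ⊢
        simpa using hq
      · intro x y hinb hcell
        exact mark_mono vL _ _ _ (hLevM x y hinb hcell)
      · intro e he hef
        rcases List.mem_append.1 he with h' | h'
        · exact hNoLevF e h' hef
        · simp only [List.mem_singleton] at h'
          subst h'
          simp only
          intro hcell
          rw [hLevM _ _ hinbN hcell] at hvis'
          cases hvis'
  · have hok' : moveOk maps n m (cx + d.1) (cy + d.2) = false := by
      cases hx : moveOk maps n m (cx + d.1) (cy + d.2)
      · rfl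
      · exact absurd hx hok
    have hA : stepA maps n m false lvl cx cy (vL, vE, qa) d = (vL, vE, qa) := by
      simp [stepA, hok']
    rw [hA]
    exact ⟨hvE, hq, hLevM, hNoLevF⟩

theorem foldF3 (maps : List String) (n m lvl cx cy : Int) (vE0 : Int × Int → Bool)
    (P : List (Int × Int × Int)) (ds : List (Int × Int))
    (st : (Int × Int → Bool) × (Int × Int → Bool) × List (Int × Int × Int × Bool))
    (h : F3 maps n m vE0 P st) :
    F3 maps n m vE0 P (ds.foldl (stepA maps n m false lvl cx cy) st) := by
  induction ds generalizing st with
  | nil => exact h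
  | cons d ds ih =>
    simp only [List.foldl_cons]
    exact ih _ (stepF3 maps n m lvl cx cy vE0 P st d h)

-- phase 2: once the lever is taken, A's run equals B's second BFS on the flagged entries
theorem phase2 (maps : List String) (n m : Int) :
    ∀ (N : Nat) (q : List (Int × Int × Int × Bool)) (vL vE : Int × Int → Bool),
      muA maps q vL vE = N →
      (∀ x y, inbP n m x y → cellAt maps x y = some 'L' → vL (x, y) = true) →
      (∀ e ∈ q, e.2.2.2 = false → cellAt maps e.1 e.2.1 ≠ some 'L') →
      bfsA maps n m q vL vE = liftRes (bfsGen maps n m 'E' (projT q) vE) := by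
  intro N
  induction N using Nat.strong_induction_on with
  | _ N IH =>
  intro q vL vE hN hLevM hNoLevF
  cases q with
  | nil => simp [bfsA, bfsGen, projT, liftRes]
  | cons e rest =>
    obtain ⟨cx, cy, lvl, flag⟩ := e
    cases flag with
    | false =>
      have hnl : cellAt maps cx cy ≠ some 'L' :=
        hNoLevF _ List.mem_cons_self rfl
      have hproj : projT ((cx, cy, lvl, false) :: rest) = projT rest := by
        simp [projT]
      simp only [bfsA]
      rw [if_neg (fun hh => hnl hh.2), if_neg (by simp)]
      have hF3 := foldF3 maps n m lvl cx cy vE (projT rest) dirs (vL, vE, rest)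
        ⟨rfl, rfl, hLevM, fun e' he' => hNoLevF e' (List.mem_cons_of_mem _ he')⟩
      obtain ⟨hvE', hq', hLevM', hNoLevF'⟩ := hF3
      have hrec := IH _ (hN ▸ muA_fold_lt maps n m false lvl cx cy rest vL vE) _ _ _
        rfl hLevM' hNoLevF'
      rw [hrec, hq', hvE', hproj]
    | true =>
      have hproj : projT ((cx, cy, lvl, true) :: rest) =
          (cx, cy, lvl) :: projT rest := by
        simp [projT]
      by_cases hE : cellAt maps cx cy = some 'E'
      · simp only [bfsA]
        rw [if_neg (by simp), if_pos (⟨trivial, hE⟩ : True ∧ cellAt maps cx cy = some 'E'),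
          hproj]
        simp [bfsGen, hE, liftRes]
      · simp only [bfsA]
        rw [if_neg (by simp), if_neg (fun hh => hE hh.2), hproj]
        have hbfs : bfsGen maps n m 'E' ((cx, cy, lvl) :: projT rest) vE =
            bfsGen maps n m 'E'
              (dirs.foldl (stepG maps n m lvl cx cy) (vE, projT rest)).2
              (dirs.foldl (stepG maps n m lvl cx cy) (vE, projT rest)).1 := by
          simp only [bfsGen]
          rw [if_neg hE]
        rw [hbfs]
        have hF2 := foldF2 maps n m lvl cx cy vL dirs (vL, vE, rest) (vE, projT rest)
          ⟨rfl, rfl, rfl, fun e' he' => hNoLevF e' (List.mem_cons_of_mem _ he')⟩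
        obtain ⟨hvL', hv', hq', hNoLevF'⟩ := hF2
        have hrec := IH _ (hN ▸ muA_fold_lt maps n m true lvl cx cy rest vL vE) _ _ _
          rfl (by rw [hvL']; exact hLevM) hNoLevF'
        rw [hq', hv']
        exact hrec

-- phase 1: before the lever, A's run equals B's first BFS, handing off to phase 2
theorem phase1 (maps : List String) (n m : Int)
    (hL1 : ∀ x y x' y' : Int, inbP n m x y → inbP n m x' y' →
      cellAt maps x y = some 'L' → cellAt maps x' y' = some 'L' → x = x' ∧ y = y') :
    ∀ (N : Nat) (q : List (Int × Int × Int × Bool)) (vL vE : Int × Int → Bool),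
      muA maps q vL vE = N →
      vE = (fun _ => false) →
      (∀ e ∈ q, e.2.2.2 = false) →
      (∀ e ∈ q, vL (e.1, e.2.1) = true) →
      (∀ e ∈ q, inbP n m e.1 e.2.1) →
      q.Pairwise (fun a b => ((a.1, a.2.1) : Int × Int) ≠ (b.1, b.2.1)) →
      bfsA maps n m q vL vE =
        (match bfsGen maps n m 'L' (q.map projF) vL with
         | none => -1
         | some (lx, ly, d1) =>
            liftRes (bfsGen maps n m 'E' [(lx, ly, d1)] (mark (fun _ => false) lx ly))) := by
  intro N
  induction N using Nat.strong_induction_on with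
  | _ N IH =>
  intro q vL vE hN hvE hAllF hMarked hInb hDist
  cases q with
  | nil => simp [bfsA, bfsGen]
  | cons e rest =>
    obtain ⟨cx, cy, lvl, flag⟩ := e
    have hflag : flag = false := hAllF _ List.mem_cons_self
    subst hflag
    subst hvE
    have hhead : projF (cx, cy, lvl, false) = (cx, cy, lvl) := rfl
    by_cases hlev : cellAt maps cx cy = some 'L'
    · -- lever reached: hand off to phase 2
      simp only [bfsA]
      rw [if_pos (⟨trivial, hlev⟩ : True ∧ cellAt maps cx cy = some 'L')]
      have hrestF : ∀ e' ∈ rest ++ [(cx, cy, lvl, true)], e'.2.2.2 = false →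
          cellAt maps e'.1 e'.2.1 ≠ some 'L' := by
        intro e' he' hef hcell
        rcases List.mem_append.1 he' with h' | h'
        · have hinb' := hInb e' (List.mem_cons_of_mem _ h')
          have hinbH := hInb _ List.mem_cons_self
          obtain ⟨h1, h2⟩ := hL1 e'.1 e'.2.1 cx cy hinb' hinbH hcell hlev
          have hne := (List.pairwise_cons.1 hDist).1 e' h'
          exact hne (by simp only [Prod.mk.injEq]; exact ⟨h1.symm, h2.symm⟩)
        · simp only [List.mem_singleton] at h'
          subst h'
          cases hef
      have hLevM : ∀ x y, inbP n m x y → cellAt maps x y = some 'L' →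
          vL (x, y) = true := by
        intro x y hinb hcell
        obtain ⟨h1, h2⟩ := hL1 x y cx cy hinb (hInb _ List.mem_cons_self) hcell hlev
        subst h1; subst h2
        exact hMarked _ List.mem_cons_self
      have hprojT : projT (rest ++ [(cx, cy, lvl, true)]) = [(cx, cy, lvl)] := by
        simp only [projT, List.filterMap_append]
        have hnilT : rest.filterMap
            (fun e => if e.2.2.2 then some (e.1, e.2.1, e.2.2.1) else none) = [] := by
          rw [List.filterMap_eq_nil_iff]
          intro e he
          rw [hAllF e (List.mem_cons_of_mem _ he)]
          simp
        rw [hnilT]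
        simp
      have h2 := phase2 maps n m _ (rest ++ [(cx, cy, lvl, true)]) vL
        (mark (fun _ => false) cx cy) rfl hLevM hrestF
      rw [h2, hprojT]
      rw [List.map_cons, hhead]
      have hLside : bfsGen maps n m 'L' ((cx, cy, lvl) :: rest.map projF) vL =
          some (cx, cy, lvl) := by
        simp only [bfsGen]
        rw [if_pos hlev]
      rw [hLside]
    · -- ordinary first-leg expansion
      simp only [bfsA]
      rw [if_neg (fun hh => hlev hh.2), if_neg (by simp)]
      have hF1 := foldF1 maps n m lvl cx cy (fun _ => false) dirs
        (vL, fun _ => false, rest) (vL, rest.map projF)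
        ⟨rfl, rfl, rfl, fun e' he' => hAllF e' (List.mem_cons_of_mem _ he'),
         fun e' he' => hMarked e' (List.mem_cons_of_mem _ he'),
         fun e' he' => hInb e' (List.mem_cons_of_mem _ he'),
         (List.pairwise_cons.1 hDist).2⟩
      obtain ⟨hv', hq', hvE', hAllF', hMarked', hInb', hDist'⟩ := hF1
      have hrec := IH _
        (hN ▸ muA_fold_lt maps n m false lvl cx cy rest vL (fun _ => false)) _ _ _
        rfl hvE' hAllF' hMarked' hInb' hDist'
      rw [List.map_cons, hhead]
      have hbfs : bfsGen maps n m 'L' ((cx, cy, lvl) :: rest.map projF) vL =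
          bfsGen maps n m 'L'
            (dirs.foldl (stepG maps n m lvl cx cy) (vL, rest.map projF)).2
            (dirs.foldl (stepG maps n m lvl cx cy) (vL, rest.map projF)).1 := by
        simp only [bfsGen]
        rw [if_neg hlev]
      rw [hbfs, hq', hv']
      exact hrec

-- the locate scans agree: B's start is exactly A's `start` component
theorem loc_agree_inner (i : Int) (cl : List (Int × Char)) :
    ∀ (stA : Option (Int × Int) × Option (Int × Int) × Option (Int × Int)),
      cl.foldl (locStepB i) stA.1 = (cl.foldl (locStepA i) stA).1 := by
  induction cl with
  | nil => intro stA; rfl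
  | cons q cl ih =>
    intro stA
    simp only [List.foldl_cons]
    rw [show locStepB i stA.1 q = ((locStepA i stA q).1) by
      by_cases h1 : q.2 = 'S'
      · simp [locStepA, locStepB, h1]
      · by_cases h2 : q.2 = 'E'
        · simp [locStepA, locStepB, h2]
        · by_cases h3 : q.2 = 'L'
          · simp [locStepA, locStepB, h3]
          · simp [locStepA, locStepB, h1, h2, h3]]
    exact ih _

theorem loc_agree_outer (l : List (Int × String)) :
    ∀ (stA : Option (Int × Int) × Option (Int × Int) × Option (Int × Int)),
      l.foldl (fun st p => (PySem.List.enumerate p.2.toList).foldl (locStepB p.1) st)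
          stA.1 =
        ((l.foldl (fun st p =>
          (PySem.List.enumerate p.2.toList).foldl (locStepA p.1) st) stA).1) := by
  induction l with
  | nil => intro stA; rfl
  | cons p l ih =>
    intro stA
    simp only [List.foldl_cons]
    rw [loc_agree_inner p.1 (PySem.List.enumerate p.2.toList) stA]
    exact ih _

theorem locate_agree (maps : List String) :
    locateB maps = (locateA maps).1 := by
  unfold locateA locateB
  exact loc_agree_outer (PySem.List.enumerate maps) (none, none, none)

-- soundness: whatever the scan records as `start` is an in-grid 'S'
def SInv (maps : List String) (o : Option (Int × Int)) : Prop :=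
  ∀ p, o = some p → cellAt maps p.1 p.2 = some 'S' ∧ 0 ≤ p.1 ∧ 0 ≤ p.2

theorem sound_inner (maps : List String) (i : Int) (cl : List (Int × Char))
    (hcl : ∀ q ∈ cl, q.2 = 'S' → cellAt maps i q.1 = some 'S' ∧ 0 ≤ i ∧ 0 ≤ q.1) :
    ∀ stA, SInv maps stA.1 → SInv maps (cl.foldl (locStepA i) stA).1 := by
  induction cl with
  | nil => intro stA h; exact h
  | cons q cl ih =>
    intro stA h
    simp only [List.foldl_cons]
    refine ih (fun q' hq' => hcl q' (List.mem_cons_of_mem _ hq')) _ ?_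
    intro p hp
    simp only [locStepA] at hp
    split at hp
    · next h1 =>
      simp only [Option.some.injEq] at hp
      subst hp
      exact hcl q List.mem_cons_self h1
    · split at hp
      · exact h p hp
      · split at hp
        · exact h p hp
        · exact h p hp

theorem sound_outer (maps : List String) (l : List (Int × String))
    (hl : ∀ p ∈ l, ∀ q ∈ PySem.List.enumerate p.2.toList, q.2 = 'S' →
      cellAt maps p.1 q.1 = some 'S' ∧ 0 ≤ p.1 ∧ 0 ≤ q.1) :
    ∀ stA, SInv maps stA.1 → SInv maps ((l.foldl (fun st p =>
      (PySem.List.enumerate p.2.toList).foldl (locStepA p.1) st) stA)).1 := by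
  induction l with
  | nil => intro stA h; exact h
  | cons p l ih =>
    intro stA h
    simp only [List.foldl_cons]
    exact ih (fun p' hp' => hl p' (List.mem_cons_of_mem _ hp')) _
      (sound_inner maps p.1 _ (hl p List.mem_cons_self) stA h)

theorem cellAt_enum (maps : List String) (p : Int × String)
    (hp : p ∈ PySem.List.enumerate maps 0) (q : Int × Char)
    (hq : q ∈ PySem.List.enumerate p.2.toList 0) :
    cellAt maps p.1 q.1 = some q.2 ∧ 0 ≤ p.1 ∧ 0 ≤ q.1 := by
  rw [PySem.List.mem_enumerate_iff] at hp hq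
  obtain ⟨k, hk, rfl⟩ := hp
  obtain ⟨j, hj, rfl⟩ := hq
  simp only [zero_add]
  refine ⟨?_, by positivity, by positivity⟩
  simp only [cellAt, PySem.List.pyGet?_natCast]
  rw [List.getElem?_eq_getElem hk]
  simp only [Option.bind_some]
  rw [PySem.Str.pyGet?_natCast]
  rw [List.getElem?_eq_getElem hj]

theorem sound_locate (maps : List String) : SInv maps (locateA maps).1 := by
  unfold locateA
  refine sound_outer maps _ ?_ _ (fun p hp => by cases hp)
  intro p hp q hq hS
  have h := cellAt_enum maps p hp q hq
  rw [hS] at h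
  exact h

-- completeness: if some 'S' exists the scan records a start
theorem comp_inner (i : Int) (cl : List (Int × Char)) :
    ∀ stA, (stA.1.isSome ∨ ∃ q ∈ cl, q.2 = 'S') →
      ((cl.foldl (locStepA i) stA).1).isSome := by
  induction cl with
  | nil =>
    intro stA h
    rcases h with h | ⟨q, hq, _⟩
    · exact h
    · cases hq
  | cons q cl ih =>
    intro stA h
    simp only [List.foldl_cons]
    refine ih _ ?_
    by_cases h1 : q.2 = 'S'
    · left; simp [locStepA, h1]
    · rcases h with h | ⟨q', hq', hS⟩
      · left
        simp only [locStepA]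
        split
        · simp
        · split
          · simpa using h
          · split
            · simpa using h
            · exact h
      · rcases List.mem_cons.1 hq' with rfl | hq''
        · exact absurd hS h1
        · exact Or.inr ⟨q', hq'', hS⟩

theorem comp_outer (l : List (Int × String)) :
    ∀ stA, (stA.1.isSome ∨ ∃ p ∈ l, ∃ q ∈ PySem.List.enumerate p.2.toList, q.2 = 'S') →
      ((l.foldl (fun st p =>
        (PySem.List.enumerate p.2.toList).foldl (locStepA p.1) st) stA)).1.isSome := by
  induction l with
  | nil =>
    intro stA h
    rcases h with h | ⟨p, hp, _⟩
    · exact h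
    · cases hp
  | cons p l ih =>
    intro stA h
    simp only [List.foldl_cons]
    refine ih _ ?_
    rcases h with h | ⟨p', hp', q, hq, hS⟩
    · exact Or.inl (comp_inner p.1 _ _ (Or.inl h))
    · rcases List.mem_cons.1 hp' with rfl | hp''
      · exact Or.inl (comp_inner p'.1 _ _ (Or.inr ⟨q, hq, hS⟩))
      · exact Or.inr ⟨p', hp'', q, hq, hS⟩

theorem two_le_countP {α : Type} (l : List α) (pred : α → Bool) (a b : α)
    (ha : a ∈ l) (hb : b ∈ l) (hab : a ≠ b)
    (hpa : pred a = true) (hpb : pred b = true) : 2 ≤ l.countP pred := by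
  obtain ⟨s, t, hst⟩ := List.append_of_mem ha
  subst hst
  have hb' : b ∈ s ∨ b ∈ t := by
    rcases List.mem_append.1 hb with h | h
    · exact Or.inl h
    · rcases List.mem_cons.1 h with rfl | h
      · exact absurd rfl hab
      · exact Or.inr h
  rw [List.countP_append, List.countP_cons, hpa]
  simp only [reduceIte]
  rcases hb' with h | h
  · have : 0 < s.countP pred := List.countP_pos_iff.2 ⟨b, h, hpb⟩
    omega
  · have : 0 < t.countP pred := List.countP_pos_iff.2 ⟨b, h, hpb⟩
    omega

theorem xbound_of_cellAt (maps : List String) (x y : Int) (c : Char)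
    (hx : 0 ≤ x) (hc : cellAt maps x y = some c) : x < PySem.List.len maps := by
  simp only [cellAt, Option.bind_eq_some_iff] at hc
  obtain ⟨r, hr, -⟩ := hc
  rw [PySem.List.pyGet?_of_nonneg _ hx] at hr
  have hxlen : x.toNat < maps.length := by
    by_contra h
    simp [List.getElem?_eq_none (by omega : maps.length ≤ x.toNat)] at hr
  simp only [PySem.List.len_eq]
  omega

-- ===== VERDICT (by name: the statement is the Claim_ definition above) =====
theorem solution_spec : Claim_equal_solution := by
  intro maps _ hPre
  unfold Spec_solution
  obtain ⟨hne, hgeq, hS, hScol, hL⟩ := hPre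
  have hSex : ∃ p ∈ PySem.List.enumerate maps 0,
      ∃ q ∈ PySem.List.enumerate p.2.toList 0, q.2 = 'S' := by
    have hpos : 0 < (allCells maps).countP
        (fun p => cellAt maps p.1 p.2 == some 'S') := by omega
    obtain ⟨c, hcm, hcp⟩ := List.countP_pos_iff.1 hpos
    simp only [allCells, List.mem_flatMap, List.mem_map] at hcm
    obtain ⟨p, hp, q, hq, hqc⟩ := hcm
    refine ⟨p, hp, q, hq, ?_⟩
    have hcell := (cellAt_enum maps p hp q hq).1
    subst hqc
    simp only [beq_iff_eq] at hcp
    rw [hcell] at hcp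
    exact Option.some.inj hcp
  have hsome : ((locateA maps).1).isSome := by
    unfold locateA
    exact comp_outer (PySem.List.enumerate maps 0) (none, none, none) (Or.inr hSex)
  obtain ⟨⟨sx, sy⟩, hloc⟩ := Option.isSome_iff_exists.1 hsome
  obtain ⟨hcellS, hsx, hsy⟩ := sound_locate maps (sx, sy) hloc
  have hlocB : locateB maps = some (sx, sy) := by
    rw [locate_agree, hloc]
  have hinbS : inbP (PySem.List.len maps)
      (PySem.Str.len ((PySem.List.pyGet? maps 0).getD "")) sx sy := by
    refine ⟨hsx, xbound_of_cellAt maps sx sy 'S' hsx hcellS, hsy, ?_⟩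
    exact hScol (sx, sy) (mem_allCells_of_cellAt maps sx sy 'S' hsx hsy hcellS) hcellS
  have hL1 : ∀ x y x' y' : Int,
      inbP (PySem.List.len maps) (PySem.Str.len ((PySem.List.pyGet? maps 0).getD "")) x y →
      inbP (PySem.List.len maps) (PySem.Str.len ((PySem.List.pyGet? maps 0).getD "")) x' y' →
      cellAt maps x y = some 'L' → cellAt maps x' y' = some 'L' → x = x' ∧ y = y' := by
    intro x y x' y' hi hi' hc hc'
    by_contra hne2
    have hpne : ((x, y) : Int × Int) ≠ (x', y') := by
      intro hp
      exact hne2 ⟨congrArg Prod.fst hp, congrArg Prod.snd hp⟩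
    have h2 := two_le_countP (allCells maps)
      (fun p => cellAt maps p.1 p.2 == some 'L') (x, y) (x', y')
      (mem_allCells_of_cellAt maps x y 'L' hi.1 hi.2.2.1 hc)
      (mem_allCells_of_cellAt maps x' y' 'L' hi'.1 hi'.2.2.1 hc')
      hpne (by simp [hc]) (by simp [hc'])
    omega
  have hmain := phase1 maps (PySem.List.len maps)
    (PySem.Str.len ((PySem.List.pyGet? maps 0).getD "")) hL1
    (muA maps [(sx, sy, 0, false)] (mark (fun _ => false) sx sy) (fun _ => false))
    [(sx, sy, 0, false)] (mark (fun _ => false) sx sy) (fun _ => false) rfl rfl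
    (by intro e he; simp only [List.mem_singleton] at he; subst he; rfl)
    (by intro e he; simp only [List.mem_singleton] at he; subst he; simp [mark])
    (by intro e he; simp only [List.mem_singleton] at he; subst he; exact hinbS)
    (List.pairwise_singleton _ _)
  have hmapF : List.map projF [((sx, sy, 0, false) : Int × Int × Int × Bool)] =
      [(sx, sy, 0)] := rfl
  rw [hmapF] at hmain
  simp only [solution, solution_alt, hlocB, hloc]
  rw [hmain]
  cases h2 : bfsGen maps (PySem.List.len maps)
      (PySem.Str.len ((PySem.List.pyGet? maps 0).getD "")) 'L'
      [(sx, sy, 0)] (mark (fun _ => false) sx sy) with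
  | none => rfl
  | some r =>
    obtain ⟨lx, ly, d1⟩ := r
    have hsh : ([((lx, ly, d1) : Int × Int × Int)]) =
        ([((lx, ly, 0) : Int × Int × Int)]).map (shiftE d1) := by
      simp [shiftE]
    have hshift := bfsGen_shift maps (PySem.List.len maps)
      (PySem.Str.len ((PySem.List.pyGet? maps 0).getD "")) 'E' d1
      (muG maps [(lx, ly, 0)] (mark (fun _ => false) lx ly)) [(lx, ly, 0)]
      (mark (fun _ => false) lx ly) rfl
    rw [← hsh] at hshift
    cases h3 : bfsGen maps (PySem.List.len maps)
        (PySem.Str.len ((PySem.List.pyGet? maps 0).getD "")) 'E'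
        [(lx, ly, 0)] (mark (fun _ => false) lx ly) with
    | none =>
      simp only [PySem.List.len_eq, PySem.Str.len_eq, String.length_toList] at hshift h3
      simp [liftRes, hshift, h3]
    | some r2 =>
      obtain ⟨a, b, d2⟩ := r2
      simp only [PySem.List.len_eq, PySem.Str.len_eq, String.length_toList] at hshift h3
      simp [liftRes, hshift, h3, shiftE]
      ring
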